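-- pv_equiv track=rewrite | github.com/dnovik/py-homework-advanced | 3.1.formats.json.xml/homework.py | get_unique_rating
-- ===== SOURCE A (Python) =====
-- def get_unique_rating(word_stat):
--     # функция получает все значения частоты упоминаемости слов и возвращает их уникальные значения
--
--     rating = set()
--     rates = list()
--     for stat_value in word_stat.values():
--         rating.add(stat_value)
--
--     for rate in rating:
--         rates.append(rate)
--         rates = sorted(rates, reverse=True)
--
--     return rates[0:10]
-- ===== SOURCE B (Python) =====
-- def get_unique_rating(word_stat):
--     # top 10 unique frequency values, descending: one sort of the deduplicated values
--     return sorted(set(word_stat.values()), reverse=True)[:10]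
-- ===== Notes on version B (the rewrite author's own statement) =====
-- stated objective: simpler
-- what changed: A dedups into a set, then appends each element and re-sorts the whole accumulator on every loop iteration before slicing; B replaces that append-and-resort loop with a single descending sort of the value set and a slice.
import Mathlib
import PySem

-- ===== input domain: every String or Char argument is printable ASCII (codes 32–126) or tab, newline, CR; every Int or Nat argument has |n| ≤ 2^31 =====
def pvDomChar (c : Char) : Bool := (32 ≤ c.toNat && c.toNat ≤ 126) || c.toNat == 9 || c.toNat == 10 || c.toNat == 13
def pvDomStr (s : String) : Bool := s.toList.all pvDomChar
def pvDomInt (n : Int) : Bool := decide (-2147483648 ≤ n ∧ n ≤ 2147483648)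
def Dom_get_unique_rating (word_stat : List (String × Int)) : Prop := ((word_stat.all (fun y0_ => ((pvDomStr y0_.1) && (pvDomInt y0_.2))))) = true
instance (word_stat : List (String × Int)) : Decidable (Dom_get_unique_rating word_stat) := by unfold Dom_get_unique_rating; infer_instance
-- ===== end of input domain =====

-- B replaces A's append-then-resort-the-whole-accumulator loop by a single descending sort of the value set (simpler).

-- ===== PORT A =====
def get_unique_rating (word_stat : List (String × Int)) : List Int :=
  -- rating = set(); for stat_value in word_stat.values(): rating.add(stat_value)
  let rating : PySem.Set Int := word_stat.foldl (fun s p => PySem.Set.add s p.2) PySem.Set.empty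
  -- rates = []; for rate in rating: rates.append(rate); rates = sorted(rates, reverse=True)
  -- (sorted(...) without key: the result does not depend on the set's iteration order)
  let rates : List Int := rating.foldl (fun rates rate => PySem.List.sorted (rates ++ [rate]) (fun x => x) true) []
  PySem.List.slice rates (some 0) (some 10)

-- ===== PORT B =====
def get_unique_rating_alt (word_stat : List (String × Int)) : List Int :=
  (PySem.List.sorted (PySem.Set.ofList (word_stat.map (fun p => p.2))) (fun x => x) true).take 10

-- ===== PRECONDITION & SPEC =====
def Spec_get_unique_rating (word_stat : List (String × Int)) (out : List Int) : Prop := out = get_unique_rating_alt word_stat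
instance (word_stat : List (String × Int)) (out : List Int) : Decidable (Spec_get_unique_rating word_stat out) := by unfold Spec_get_unique_rating; infer_instance

-- ===== CLAIM (what is proved, stated in full; the proofs are below) =====
def Claim_equal_get_unique_rating : Prop := ∀ (word_stat : List (String × Int)), Dom_get_unique_rating word_stat → Spec_get_unique_rating word_stat (get_unique_rating word_stat)

-- ===== LEMMAS AND PROOFS =====

-- A's set-building loop over the pairs is Set.ofList of the value list.
lemma rating_eq_ofList (word_stat : List (String × Int)) :
    word_stat.foldl (fun s p => PySem.Set.add s p.2) PySem.Set.empty
      = PySem.Set.ofList (word_stat.map (fun p => p.2)) := by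
  rw [PySem.Set.ofList_eq_foldl, List.foldl_map]
  rfl

-- Re-sorting (sorted acc ++ [x]) descending equals sorting (acc ++ [x]) descending, given no duplicates.
lemma sorted_append_sorted (pref : List Int) (x : Int) (h : (pref ++ [x]).Nodup) :
    PySem.List.sorted (PySem.List.sorted pref (fun y => y) true ++ [x]) (fun y => y) true
      = PySem.List.sorted (pref ++ [x]) (fun y => y) true := by
  apply PySem.List.sorted_rev_eq_of_perm_of_pairwise_gt
  · exact (PySem.List.sorted_perm (pref ++ [x]) _ true).trans
      ((PySem.List.sorted_perm pref (fun y => y) true).symm.append_right [x])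
  · have hnd : (PySem.List.sorted (pref ++ [x]) (fun y => y) true).Nodup :=
      (PySem.List.sorted_perm (pref ++ [x]) _ true).nodup_iff.mpr h
    have hle := PySem.List.sorted_pairwise_rev (pref ++ [x]) (fun y => y)
    exact (List.Pairwise.and hle hnd).imp (fun hab => lt_of_le_of_ne hab.1 (Ne.symm hab.2))

-- A's loop invariant: folding append-and-resort over the rest of a duplicate-free list.
lemma foldl_resort (s pref : List Int) (h : (pref ++ s).Nodup) :
    s.foldl (fun rates rate => PySem.List.sorted (rates ++ [rate]) (fun y => y) true)
        (PySem.List.sorted pref (fun y => y) true)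
      = PySem.List.sorted (pref ++ s) (fun y => y) true := by
  induction s generalizing pref with
  | nil => simp
  | cons x t ih =>
    have hx : (pref ++ [x]).Nodup :=
      h.sublist ((List.append_sublist_append_left pref).mpr (by simp))
    simp only [List.foldl_cons, sorted_append_sorted pref x hx]
    have : pref ++ x :: t = (pref ++ [x]) ++ t := by simp
    rw [this] at h ⊢
    exact ih (pref ++ [x]) h

-- ===== VERDICT (by name: the statement is the Claim_ definition above) =====
theorem get_unique_rating_spec : Claim_equal_get_unique_rating := by
  intro word_stat _
  have h := foldl_resort (PySem.Set.ofList (word_stat.map (fun p => p.2))) []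
    (by simp [PySem.Set.nodup_ofList])
  rw [show PySem.List.sorted [] (fun y : Int => y) true = [] from rfl] at h
  simp only [List.nil_append] at h
  unfold Spec_get_unique_rating get_unique_rating get_unique_rating_alt
  simp only [rating_eq_ofList, h]
  rw [PySem.List.slice_zero_start, PySem.List.slice_to]
  · rfl
  · norm_num
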